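-- pv_equiv track=rewrite | github.com/open-contracting/spoonbill | spoonbill/utils.py | insert_after_key
-- ===== SOURCE A (Python) =====
-- from collections import OrderedDict
--
-- def insert_after_key(columns, insert, last_key):
--     data = OrderedDict()
--     for key, val in columns.items():
--         data[key] = val
--         if key == last_key:
--             for k, v in insert.items():
--                 data[k] = v
--     return data
-- ===== SOURCE B (Python) =====
-- from collections import OrderedDict
--
-- def insert_after_key(columns, insert, last_key):
--     items = list(columns.items())
--     keys = [k for k, _ in items]
--     if last_key in keys:
--         i = keys.index(last_key)
--         items = items[:i + 1] + list(insert.items()) + items[i + 1:]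
--     return OrderedDict(items)
-- ===== Notes on version B (the rewrite author's own statement) =====
-- stated objective: alternative
-- what changed: B locates last_key once and splices the insert block in by list slicing, then builds the dict in one plain pass, instead of A's single loop that tests every key and runs a nested insertion loop inside the dict-building pass; Pre_ excludes association lists with duplicate columns keys, which do not represent a Python dict (A's argument is a dict, so such lists never reach A).
import Mathlib
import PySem

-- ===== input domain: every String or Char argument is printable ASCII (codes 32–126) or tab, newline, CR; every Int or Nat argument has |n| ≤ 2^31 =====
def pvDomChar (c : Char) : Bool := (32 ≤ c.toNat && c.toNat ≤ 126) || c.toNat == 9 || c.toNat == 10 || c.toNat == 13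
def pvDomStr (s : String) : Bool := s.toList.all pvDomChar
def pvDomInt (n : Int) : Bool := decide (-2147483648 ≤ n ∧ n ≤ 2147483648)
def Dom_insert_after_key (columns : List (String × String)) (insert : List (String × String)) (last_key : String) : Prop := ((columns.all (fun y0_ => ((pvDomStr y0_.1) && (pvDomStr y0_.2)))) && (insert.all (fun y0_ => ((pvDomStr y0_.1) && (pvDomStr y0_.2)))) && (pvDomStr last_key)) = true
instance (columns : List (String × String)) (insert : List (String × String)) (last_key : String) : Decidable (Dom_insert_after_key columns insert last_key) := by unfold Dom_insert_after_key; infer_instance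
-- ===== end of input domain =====

-- B splices the insert block in after last_key by list slicing and builds the dict in one plain pass,
-- instead of A's key-test with a nested insertion loop inside the dict-building pass (alternative decomposition, same cost).


-- ===== PORT A =====
-- for key, val in columns.items(): data[key] = val; if key == last_key: for k, v in insert.items(): data[k] = v
def insert_after_key (columns : List (String × String)) (insert : List (String × String)) (last_key : String) : List (String × String) :=
  (columns.foldl
    (fun (data : PySem.Dict String String) kv =>
      let data := data.insert kv.1 kv.2
      if kv.1 = last_key then insert.foldl (fun d p => d.insert p.1 p.2) data else data)
    PySem.Dict.empty).items

-- ===== PORT B =====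
def insert_after_key_alt (columns : List (String × String)) (insert : List (String × String)) (last_key : String) : List (String × String) :=
  let keys := columns.map Prod.fst
  let items :=
    match PySem.List.index? keys last_key with    -- `last_key in keys` + `keys.index(last_key)`
    | some i => columns.take (i + 1) ++ insert ++ columns.drop (i + 1)
    | none => columns
  -- OrderedDict(items): assign each pair in order
  (items.foldl (fun (d : PySem.Dict String String) p => d.insert p.1 p.2) PySem.Dict.empty).items

-- ===== PRECONDITION & SPEC =====
-- Pre_ excludes association lists whose columns keys repeat: they do not represent a Python dict (A's
-- `columns` parameter is a dict, whose keys are unique, so A is never called on such a list).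
def Pre_insert_after_key (columns : List (String × String)) (insert : List (String × String)) (last_key : String) : Prop :=
  (columns.map Prod.fst).Nodup
instance (columns : List (String × String)) (insert : List (String × String)) (last_key : String) : Decidable (Pre_insert_after_key columns insert last_key) := by unfold Pre_insert_after_key; infer_instance
def pvWitness_insert_after_key : (List (String × String)) × (List (String × String)) × String :=
  ([("a", "1"), ("b", "2")], [("c", "9")], "a")

def Spec_insert_after_key (columns : List (String × String)) (insert : List (String × String)) (last_key : String) (out : List (String × String)) : Prop := out = insert_after_key_alt columns insert last_key
instance (columns : List (String × String)) (insert : List (String × String)) (last_key : String) (out : List (String × String)) : Decidable (Spec_insert_after_key columns insert last_key out) := by unfold Spec_insert_after_key; infer_instance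

-- ===== CLAIM (what is proved, stated in full; the proofs are below) =====
def Claim_equal_insert_after_key : Prop := ∀ (columns : List (String × String)) (insert : List (String × String)) (last_key : String), Dom_insert_after_key columns insert last_key → Pre_insert_after_key columns insert last_key → Spec_insert_after_key columns insert last_key (insert_after_key columns insert last_key)

-- ===== LEMMAS AND PROOFS =====

-- When last_key never occurs, A's loop body is a plain insert.
theorem foldl_stepA_no_hit (insert : List (String × String)) (last_key : String)
    (columns : List (String × String)) (d : PySem.Dict String String)
    (h : last_key ∉ columns.map Prod.fst) :
    columns.foldl
      (fun (data : PySem.Dict String String) kv =>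
        let data := data.insert kv.1 kv.2
        if kv.1 = last_key then insert.foldl (fun d p => d.insert p.1 p.2) data else data)
      d
    = columns.foldl (fun (d : PySem.Dict String String) p => d.insert p.1 p.2) d := by
  induction columns generalizing d with
  | nil => rfl
  | cons kv rest ih =>
    simp only [List.map_cons, List.mem_cons, not_or] at h
    simp only [List.foldl_cons, if_neg (fun e : kv.1 = last_key => h.1 e.symm)]
    exact ih _ h.2

-- A's insertion SEQUENCE equals B's spliced list when columns keys are unique.
theorem foldl_stepA_eq_splice (insert : List (String × String)) (last_key : String)
    (columns : List (String × String)) (d : PySem.Dict String String)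
    (hnd : (columns.map Prod.fst).Nodup) :
    columns.foldl
      (fun (data : PySem.Dict String String) kv =>
        let data := data.insert kv.1 kv.2
        if kv.1 = last_key then insert.foldl (fun d p => d.insert p.1 p.2) data else data)
      d
    = (match PySem.List.index? (columns.map Prod.fst) last_key with
       | some i => columns.take (i + 1) ++ insert ++ columns.drop (i + 1)
       | none => columns).foldl (fun (d : PySem.Dict String String) (p : String × String) => d.insert p.1 p.2) d := by
  induction columns generalizing d with
  | nil => rfl
  | cons kv rest ih =>
    simp only [List.map_cons, List.nodup_cons] at hnd
    by_cases hk : kv.1 = last_key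
    · subst hk
      simp only [List.map_cons]
      rw [PySem.List.index?_cons_self]
      simp only [List.foldl_cons, List.take_succ_cons, List.take_zero,
        List.drop_succ_cons, List.drop_zero, List.cons_append, List.foldl_append]
      exact foldl_stepA_no_hit insert kv.1 rest _ hnd.1
    · simp only [List.map_cons]
      rw [PySem.List.index?_cons_of_ne _ hk]
      cases hidx : PySem.List.index? (rest.map Prod.fst) last_key with
      | none =>
        simp only [Option.map_none]
        simp only [List.foldl_cons, if_neg hk]
        refine foldl_stepA_no_hit insert last_key rest _ ?_
        rw [← PySem.List.index?_eq_none_iff]; exact hidx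
      | some i =>
        simp only [Option.map_some]
        simp only [List.foldl_cons, if_neg hk, List.take_succ_cons, List.drop_succ_cons,
          List.cons_append]
        rw [ih _ hnd.2, hidx]

-- ===== VERDICT (by name: the statement is the Claim_ definition above) =====
theorem insert_after_key_spec : Claim_equal_insert_after_key := by
  intro columns insert last_key _ hpre
  unfold Spec_insert_after_key insert_after_key insert_after_key_alt
  exact congrArg PySem.Dict.items (foldl_stepA_eq_splice insert last_key columns PySem.Dict.empty hpre)
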